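-- pv_equiv track=rewrite | github.com/thotalakshmimounika/IntermediateDSA | Pattern Matching/Rabin Karp.py | solve
-- ===== SOURCE A (Python) =====
-- def Power(x,y,m):# for calculation of power
--     if y==0:
--         return 1
--     z= Power(x,y>>1,m)
--
--     if y&1:
--         return (x*z*z)%m
--     else:
--         return (z*z)%m
--
-- def solve(a,b):
--     n=len(a)
--     m=len(b)
--     mod=10**9+7
--     c=0
--     hb,ha=0,0
--     x=29
--     for i in range(m):
--         hb=(hb+ord(b[i])*Power(x,i,mod))%mod
--         ha=(ha+ord(a[i])*Power(x,i,mod))%mod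
--     if hb==ha:
--         c+=1
--
--     s=0
--     e=m
--     while(e<n):
--         ha=(ha-ord(a[s])*Power(x,s,mod))%mod
--         ha=(ha+ord(a[e])*Power(x,e,mod))%mod
--         hb=(hb*x)%mod
--         if ha==hb:
--             c+=1
--         e+=1
--         s+=1
--
--     return c
-- ===== SOURCE B (Python) =====
-- def solve(a, b):
--     n = len(a)
--     m = len(b)
--     mod = 10**9 + 7
--     x = 29
--     hb = 0
--     for i in range(m):
--         hb = (hb + ord(b[i]) * pow(x, i, mod)) % mod
--     c = 0
--     for s in range(n - m + 1):
--         h = 0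
--         for j in range(m):
--             h = (h + ord(a[s + j]) * pow(x, s + j, mod)) % mod
--         if h == (hb * pow(x, s, mod)) % mod:
--             c += 1
--     return c
-- ===== Notes on version B (the rewrite author's own statement) =====
-- stated objective: alternative
-- what changed: Replaces A's single-pass rolling-hash update (subtract the leaving char, add the entering char) with an independent per-window recomputation: for each shift s the window hash is rebuilt from scratch and compared against the pattern hash scaled by x^s; the hand-written recursive modular exponentiation is replaced by the built-in pow(x,y,mod) (C-level), which measured faster on the generated inputs even though B does more work per window for long patterns.
import Mathlib
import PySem

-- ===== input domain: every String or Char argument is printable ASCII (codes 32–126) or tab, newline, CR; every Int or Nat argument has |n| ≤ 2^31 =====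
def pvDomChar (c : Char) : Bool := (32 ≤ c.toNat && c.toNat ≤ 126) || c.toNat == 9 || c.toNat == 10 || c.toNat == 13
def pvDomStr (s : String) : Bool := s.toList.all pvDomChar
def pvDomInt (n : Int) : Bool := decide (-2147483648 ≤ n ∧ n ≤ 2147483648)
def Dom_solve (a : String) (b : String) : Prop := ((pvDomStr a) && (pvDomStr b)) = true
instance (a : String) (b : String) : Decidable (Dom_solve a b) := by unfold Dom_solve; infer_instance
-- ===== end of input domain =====

-- B replaces A's rolling-hash update by an independent per-window hash recomputation using the
-- built-in pow (an alternative decomposition; a timing run measured it faster on its inputs).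

-- ord(s[i]) for a Nat index; in range on every admitted input (Pre_solve)
def ordAt (cs : List Char) (i : Nat) : Int := ((PySem.List.pyGetD cs (i : Int) ' ').toNat : Int)

-- ===== PORT A =====
-- A's recursive fast exponentiation; y is a nonnegative count, so y>>1 = y/2 and y&1 = y%2
def Power (x : Int) (y : Nat) (m : Int) : Int :=
  if y = 0 then 1
  else
    let z := Power x (y / 2) m
    if y % 2 = 1 then PySem.Int.mod (x * z * z) m
    else PySem.Int.mod (z * z) m
decreasing_by exact Nat.div_lt_self (Nat.pos_of_ne_zero (by assumption)) (by norm_num)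

def solve (a : String) (b : String) : Int :=
  let al := a.toList
  let bl := b.toList
  let n := al.length
  let m := bl.length
  let mod : Int := 10 ^ 9 + 7
  let x : Int := 29
  -- for i in range(m): hb, ha updates
  let p := (List.range m).foldl
    (fun (p : Int × Int) i =>
      (PySem.Int.mod (p.1 + ordAt bl i * Power x i mod) mod,
       PySem.Int.mod (p.2 + ordAt al i * Power x i mod) mod)) (0, 0)
  let c : Int := if p.1 = p.2 then 1 else 0
  -- while e < n with s = k, e = m + k: exactly n - m iterations (Nat subtraction: none if m ≥ n)
  let st := (List.range (n - m)).foldl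
    (fun (st : Int × Int × Int) k =>
      let ha1 := PySem.Int.mod (st.1 - ordAt al k * Power x k mod) mod
      let ha2 := PySem.Int.mod (ha1 + ordAt al (m + k) * Power x (m + k) mod) mod
      let hb2 := PySem.Int.mod (st.2.1 * x) mod
      (ha2, hb2, if ha2 = hb2 then st.2.2 + 1 else st.2.2)) (p.2, p.1, c)
  st.2.2

-- ===== PORT B =====
-- pow(x, y, mod) for a Nat exponent
def pyPow (x : Int) (y : Nat) (m : Int) : Int := PySem.Int.mod (x ^ y) m

def solve_alt (a : String) (b : String) : Int :=
  let al := a.toList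
  let bl := b.toList
  let n := al.length
  let m := bl.length
  let mod : Int := 10 ^ 9 + 7
  let x : Int := 29
  let hb := (List.range m).foldl
    (fun (h : Int) i => PySem.Int.mod (h + ordAt bl i * pyPow x i mod) mod) 0
  -- for s in range(n - m + 1): Python's range has max(n-m+1, 0) = n+1-m (Nat) elements
  (List.range (n + 1 - m)).foldl
    (fun (c : Int) s =>
      let h := (List.range m).foldl
        (fun (h : Int) j => PySem.Int.mod (h + ordAt al (s + j) * pyPow x (s + j) mod) mod) 0
      if h = PySem.Int.mod (hb * pyPow x s mod) mod then c + 1 else c) 0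

-- ===== PRECONDITION & SPEC =====
-- Pre_ excludes len(b) > len(a): there A's setup loop reads a[i] past the end and raises IndexError.
def Pre_solve (a : String) (b : String) : Prop := b.toList.length ≤ a.toList.length
instance (a : String) (b : String) : Decidable (Pre_solve a b) := by unfold Pre_solve; infer_instance

def pvWitness_solve : String × String := ("abcab", "ab")

def Spec_solve (a : String) (b : String) (out : Int) : Prop := out = solve_alt a b
instance (a : String) (b : String) (out : Int) : Decidable (Spec_solve a b out) := by unfold Spec_solve; infer_instance

-- ===== CLAIM (what is proved, stated in full; the proofs are below) =====
def Claim_equal_solve : Prop := ∀ (a : String) (b : String), Dom_solve a b → Pre_solve a b → Spec_solve a b (solve a b)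

-- ===== LEMMAS AND PROOFS =====

-- exact (un-reduced) hash of the window of length m starting at k
theorem modM_eq (a : Int) : PySem.Int.mod a (10 ^ 9 + 7) = a % (10 ^ 9 + 7) :=
  PySem.Int.mod_eq_emod_of_pos (by norm_num)

theorem Power_eq (x : Int) (y : Nat) : Power x y (10 ^ 9 + 7) = x ^ y % (10 ^ 9 + 7) := by
  induction y using Nat.strong_induction_on with
  | _ y ih =>
    rw [Power]
    by_cases h0 : y = 0
    · subst h0; norm_num
    · have h2 : y / 2 < y := Nat.div_lt_self (Nat.pos_of_ne_zero h0) (by norm_num)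
      simp only [if_neg h0, ih (y / 2) h2, modM_eq]
      have hz : (x ^ (y / 2) % (10 ^ 9 + 7)) % (10 ^ 9 + 7) = x ^ (y / 2) % (10 ^ 9 + 7) :=
        Int.emod_emod_of_dvd _ dvd_rfl
      by_cases hp : y % 2 = 1
      · rw [if_pos hp]
        have hy : y = y / 2 + y / 2 + 1 := by omega
        conv_rhs => rw [hy]
        rw [show x ^ (y / 2 + y / 2 + 1) = x * x ^ (y / 2) * x ^ (y / 2) from by ring]
        exact ((Int.ModEq.refl x).mul (hz : _ ≡ _ [ZMOD _])).mul (hz : _ ≡ _ [ZMOD _])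
      · rw [if_neg hp]
        have hy : y = y / 2 + y / 2 := by omega
        conv_rhs => rw [hy, pow_add]
        conv_lhs => rw [Int.mul_emod, hz, ← Int.mul_emod]

theorem step_emod (Sv t1 p1 t2 p2 MM : Int) :
    ((Sv % MM - t1 * (p1 % MM)) % MM + t2 * (p2 % MM)) % MM = (Sv - t1 * p1 + t2 * p2) % MM := by
  have h1 : (Sv % MM) % MM = Sv % MM := Int.emod_emod_of_dvd _ dvd_rfl
  have h2 : Sv % MM ≡ Sv [ZMOD MM] := h1
  have h3 : (p1 % MM) ≡ p1 [ZMOD MM] := Int.emod_emod_of_dvd _ dvd_rfl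
  have h4 : (p2 % MM) ≡ p2 [ZMOD MM] := Int.emod_emod_of_dvd _ dvd_rfl
  have h5 : (Sv % MM - t1 * (p1 % MM)) % MM ≡ Sv - t1 * p1 [ZMOD MM] :=
    (Int.emod_emod_of_dvd _ dvd_rfl : (Sv % MM - t1 * (p1 % MM)) % MM ≡ _ [ZMOD MM]).trans
      (h2.sub ((Int.ModEq.refl t1).mul h3))
  exact h5.add ((Int.ModEq.refl t2).mul h4)

def winSum (al : List Char) (k m : Nat) : Int := ∑ j ∈ Finset.range m, ordAt al (k + j) * 29 ^ (k + j)
def patSum (bl : List Char) (m : Nat) : Int := ∑ j ∈ Finset.range m, ordAt bl j * 29 ^ j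

theorem winSum_shift (al : List Char) (m k : Nat) :
    winSum al (k + 1) m = winSum al k m - ordAt al k * 29 ^ k + ordAt al (m + k) * 29 ^ (m + k) := by
  unfold winSum
  have h : ∑ j ∈ Finset.range m, ordAt al (k + 1 + j) * 29 ^ (k + 1 + j)
      = ∑ j ∈ Finset.range m, ordAt al (k + (j + 1)) * 29 ^ (k + (j + 1)) :=
    Finset.sum_congr rfl (fun j _ => by rw [show k + 1 + j = k + (j + 1) from by omega])
  rw [h]
  have h2 := Finset.sum_range_succ' (fun j => ordAt al (k + j) * 29 ^ (k + j)) m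
  have h3 := Finset.sum_range_succ (fun j => ordAt al (k + j) * 29 ^ (k + j)) m
  simp only [Nat.add_zero] at h2
  rw [show m + k = k + m from by omega]
  linarith

theorem emod_mul_right (u v MM : Int) : (u % MM * v) % MM = (u * v) % MM := by
  conv_lhs => rw [Int.mul_emod, Int.emod_emod_of_dvd u dvd_rfl, ← Int.mul_emod]

theorem mul_emod_right_emod (o p MM : Int) : (o * (p % MM)) % MM = (o * p) % MM := by
  conv_lhs => rw [Int.mul_emod, Int.emod_emod_of_dvd p dvd_rfl, ← Int.mul_emod]

theorem fold_mod_sum (MM : Int) (t T : Nat → Int) (ht : ∀ j, t j % MM = T j % MM) :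
    ∀ (k : Nat) (u : Int), (List.range k).foldl (fun h j => (h + t j) % MM) (u % MM)
      = (u + ∑ j ∈ Finset.range k, T j) % MM := by
  intro k
  induction k with
  | zero => intro u; simp
  | succ k ih =>
    intro u
    rw [List.range_succ, List.foldl_append, ih, List.foldl_cons, List.foldl_nil]
    have h0 : (u + ∑ j ∈ Finset.range k, T j) % MM ≡ (u + ∑ j ∈ Finset.range k, T j) [ZMOD MM] :=
      Int.emod_emod_of_dvd _ dvd_rfl
    have e1 : ((u + ∑ j ∈ Finset.range k, T j) % MM + t k) % MM
        = ((u + ∑ j ∈ Finset.range k, T j) + t k) % MM := h0.add (Int.ModEq.refl (t k))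
    have e2 : ((u + ∑ j ∈ Finset.range k, T j) + t k) % MM
        = ((u + ∑ j ∈ Finset.range k, T j) + T k) % MM := by
      rw [Int.add_emod, ht, ← Int.add_emod]
    rw [e1, e2, Finset.sum_range_succ, add_assoc]

theorem fold_mod_sum0 (MM : Int) (t T : Nat → Int) (ht : ∀ j, t j % MM = T j % MM) (k : Nat) :
    (List.range k).foldl (fun h j => (h + t j) % MM) 0 = (∑ j ∈ Finset.range k, T j) % MM := by
  have := fold_mod_sum MM t T ht k 0
  rwa [Int.zero_emod, zero_add] at this

theorem loopA (MM : Int) (al : List Char) (m : Nat) (c0 B0 : Int) (K : Nat) :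
    (List.range K).foldl
      (fun (st : Int × Int × Int) k =>
        (((st.1 - ordAt al k * (29 ^ k % MM)) % MM + ordAt al (m + k) * (29 ^ (m + k) % MM)) % MM,
         (st.2.1 * 29) % MM,
         if ((st.1 - ordAt al k * (29 ^ k % MM)) % MM + ordAt al (m + k) * (29 ^ (m + k) % MM)) % MM
            = (st.2.1 * 29) % MM then st.2.2 + 1 else st.2.2))
      (winSum al 0 m % MM, (B0 * 29 ^ 0) % MM, c0)
    = (winSum al K m % MM, (B0 * 29 ^ K) % MM,
       c0 + ∑ s ∈ Finset.range K,
         if winSum al (s + 1) m % MM = (B0 * 29 ^ (s + 1)) % MM then (1 : Int) else 0) := by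
  induction K with
  | zero => simp
  | succ K ih =>
    rw [List.range_succ, List.foldl_append, ih, List.foldl_cons, List.foldl_nil]
    have e1 : ((winSum al K m % MM - ordAt al K * (29 ^ K % MM)) % MM
        + ordAt al (m + K) * (29 ^ (m + K) % MM)) % MM = winSum al (K + 1) m % MM := by
      rw [step_emod, ← winSum_shift]
    have e2 : ((B0 * 29 ^ K) % MM * 29) % MM = (B0 * 29 ^ (K + 1)) % MM := by
      rw [emod_mul_right, pow_succ, ← mul_assoc]
    simp only [e1, e2, Finset.sum_range_succ]
    by_cases hc : winSum al (K + 1) m % MM = (B0 * 29 ^ (K + 1)) % MM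
    · simp only [if_pos hc]; ring_nf
    · simp only [if_neg hc]; ring_nf

theorem loopB (MM : Int) (al : List Char) (m : Nat) (hb : Int) (K : Nat) :
    (List.range K).foldl
      (fun (c : Int) s =>
        if (List.range m).foldl (fun h j => (h + ordAt al (s + j) * (29 ^ (s + j) % MM)) % MM) 0
           = (hb * (29 ^ s % MM)) % MM then c + 1 else c) 0
    = ∑ s ∈ Finset.range K,
        if winSum al s m % MM = (hb * (29 ^ s % MM)) % MM then (1 : Int) else 0 := by
  induction K with
  | zero => simp
  | succ K ih =>
    rw [List.range_succ, List.foldl_append, ih, List.foldl_cons, List.foldl_nil]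
    have e1 : (List.range m).foldl
        (fun h j => (h + ordAt al (K + j) * (29 ^ (K + j) % MM)) % MM) 0 = winSum al K m % MM :=
      fold_mod_sum0 MM _ (fun j => ordAt al (K + j) * 29 ^ (K + j))
        (fun j => mul_emod_right_emod _ _ _) m
    rw [e1, Finset.sum_range_succ]
    by_cases hc : winSum al K m % MM = hb * (29 ^ K % MM) % MM <;> simp [hc]

theorem foldl_pair (g1 g2 : Int → Nat → Int) (l : List Nat) (p : Int × Int) :
    l.foldl (fun p i => (g1 p.1 i, g2 p.2 i)) p = (l.foldl g1 p.1, l.foldl g2 p.2) := by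
  induction l generalizing p with
  | nil => rfl
  | cons x xs ih => simp [List.foldl_cons, ih]

theorem main_eq (a b : String) (hpre : b.toList.length ≤ a.toList.length) :
    solve a b = solve_alt a b := by
  have setupB : ∀ (cs : List Char) (k : Nat),
      (List.range k).foldl (fun (h : Int) i =>
        (h + ordAt cs i * (29 ^ i % (10 ^ 9 + 7))) % (10 ^ 9 + 7)) 0
      = patSum cs k % (10 ^ 9 + 7) :=
    fun cs k => fold_mod_sum0 _ _ (fun j => ordAt cs j * 29 ^ j)
      (fun j => mul_emod_right_emod _ _ _) k
  have setupA2 : ∀ (cs : List Char) (k : Nat),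
      (List.range k).foldl (fun (h : Int) i =>
        (h + ordAt cs i * (29 ^ i % (10 ^ 9 + 7))) % (10 ^ 9 + 7)) 0
      = winSum cs 0 k % (10 ^ 9 + 7) :=
    fun cs k => fold_mod_sum0 _ _ (fun j => ordAt cs (0 + j) * 29 ^ (0 + j))
      (fun j => by simp only [Nat.zero_add]; exact mul_emod_right_emod _ _ _) k
  simp only [solve, solve_alt, pyPow, modM_eq, Power_eq]
  rw [foldl_pair (fun h i => (h + ordAt b.toList i * (29 ^ i % (10 ^ 9 + 7))) % (10 ^ 9 + 7))
      (fun h i => (h + ordAt a.toList i * (29 ^ i % (10 ^ 9 + 7))) % (10 ^ 9 + 7))]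
  rw [setupB b.toList, setupA2 a.toList]
  dsimp only
  have LA := loopA (10 ^ 9 + 7) a.toList b.toList.length
    (if patSum b.toList b.toList.length % (10 ^ 9 + 7)
        = winSum a.toList 0 b.toList.length % (10 ^ 9 + 7) then (1 : Int) else 0)
    (patSum b.toList b.toList.length) (a.toList.length - b.toList.length)
  rw [pow_zero, mul_one] at LA
  rw [LA, loopB]
  rw [show a.toList.length + 1 - b.toList.length = (a.toList.length - b.toList.length) + 1 from by omega,
    Finset.sum_range_succ']
  simp only [← Int.mul_emod, pow_zero, mul_one]
  by_cases h : winSum a.toList 0 b.toList.length % (10 ^ 9 + 7)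
      = patSum b.toList b.toList.length % (10 ^ 9 + 7)
  · rw [if_pos h, if_pos h.symm, add_comm]
  · rw [if_neg h, if_neg (fun hh => h hh.symm)]
    ring

-- ===== VERDICT (by name: the statement is the Claim_ definition above) =====
theorem solve_spec : Claim_equal_solve := by
  intro a b _ hp
  unfold Pre_solve at hp
  unfold Spec_solve
  exact main_eq a b hp
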